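-- pv_equiv track=rewrite | github.com/robotflow-initiative/rfmarkit-processing | example/LED_Tracker.py | get_diff_bit
-- ===== SOURCE A (Python) =====
-- from typing import List, Optional
--
-- def get_diff_bit(bit_list: List[int]):
--     """
--     Finding the real bit in one manchester encoding cycle
--     :param bit_list: List of int(0, 1)
--     :return: int(0, 1)
--     """
--     num_bits = len(bit_list)
--     for idx in range(num_bits):
--         if sum(bit_list[:idx + 1]) == (idx + 1) and sum(bit_list[idx + 1:]) == 0:
--             return 0
--         elif sum(bit_list[:idx + 1]) == 0 and sum(bit_list[idx + 1:]) == (num_bits - 1 - idx):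
--             return 1
--     return None # not valid
-- ===== SOURCE B (Python) =====
-- from typing import List, Optional
--
-- def get_diff_bit(bit_list: List[int]):
--     """Single pass: running prefix sum + precomputed total instead of re-summing slices."""
--     n = len(bit_list)
--     total = sum(bit_list)
--     prefix = 0
--     for idx, b in enumerate(bit_list):
--         prefix += b
--         if prefix == idx + 1 and total == prefix:
--             return 0
--         if prefix == 0 and total == n - 1 - idx:
--             return 1
--     return None
-- ===== Notes on version B (the rewrite author's own statement) =====
-- stated objective: faster
-- what changed: Replaces the per-index slice-and-resum loop by a single pass that maintains a running prefix sum and compares against the precomputed total, so no slices are built and no inner summation occurs.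
import Mathlib
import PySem

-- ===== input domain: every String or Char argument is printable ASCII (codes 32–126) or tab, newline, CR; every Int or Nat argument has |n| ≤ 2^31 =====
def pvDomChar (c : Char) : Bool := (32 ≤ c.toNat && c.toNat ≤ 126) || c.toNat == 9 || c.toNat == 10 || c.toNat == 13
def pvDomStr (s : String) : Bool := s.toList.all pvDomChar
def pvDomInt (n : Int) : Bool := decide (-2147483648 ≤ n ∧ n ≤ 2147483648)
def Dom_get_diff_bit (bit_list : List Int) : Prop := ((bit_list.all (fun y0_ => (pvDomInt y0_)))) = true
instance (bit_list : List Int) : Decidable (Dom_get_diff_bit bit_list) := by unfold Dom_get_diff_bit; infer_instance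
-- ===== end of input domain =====

-- B replaces A's per-index slice-and-resum scan by one pass with a running prefix sum
-- against the precomputed total (objective: faster, O(n) instead of O(n^2)).

-- ===== PORT A =====
-- A's 'for idx in range(num_bits)' loop, recursing over the range list; the slice sums
-- are recomputed at every index, exactly as in the Python.
def get_diff_bit_go (bit_list : List Int) (num_bits : Int) : List Int → Option Int
  | [] => none
  | idx :: rest =>
    if (PySem.List.slice bit_list none (some (idx + 1))).sum = idx + 1 ∧
       (PySem.List.slice bit_list (some (idx + 1)) none).sum = 0 then
      some 0
    else if (PySem.List.slice bit_list none (some (idx + 1))).sum = 0 ∧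
       (PySem.List.slice bit_list (some (idx + 1)) none).sum = num_bits - 1 - idx then
      some 1
    else
      get_diff_bit_go bit_list num_bits rest

def get_diff_bit (bit_list : List Int) : Option Int :=
  let num_bits : Int := (bit_list.length : Int)
  get_diff_bit_go bit_list num_bits (PySem.List.pyRange 0 num_bits 1)

-- ===== PORT B =====
-- B's single 'for idx, b in enumerate(bit_list)' pass, carrying the running prefix sum.
def get_diff_bit_alt_go (n total : Int) : Int → Int → List Int → Option Int
  | _, _, [] => none
  | prefix_, idx, b :: rest =>
    let p := prefix_ + b
    if p = idx + 1 ∧ total = p then some 0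
    else if p = 0 ∧ total = n - 1 - idx then some 1
    else get_diff_bit_alt_go n total p (idx + 1) rest

def get_diff_bit_alt (bit_list : List Int) : Option Int :=
  get_diff_bit_alt_go (bit_list.length : Int) bit_list.sum 0 0 bit_list

-- ===== PRECONDITION & SPEC =====
def Spec_get_diff_bit (bit_list : List Int) (out : Option Int) : Prop := out = get_diff_bit_alt bit_list
instance (bit_list : List Int) (out : Option Int) : Decidable (Spec_get_diff_bit bit_list out) := by unfold Spec_get_diff_bit; infer_instance

-- ===== CLAIM (what is proved, stated in full; the proofs are below) =====
def Claim_equal_get_diff_bit : Prop := ∀ (bit_list : List Int), Dom_get_diff_bit bit_list → Spec_get_diff_bit bit_list (get_diff_bit bit_list)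

-- ===== LEMMAS AND PROOFS =====

-- Invariant: after consuming 'done', A's remaining range loop equals B's remaining pass.
theorem get_diff_bit_key (bl : List Int) (xs : List Int) :
    ∀ done : List Int, bl = done ++ xs →
    get_diff_bit_go bl (bl.length : Int) (PySem.List.pyRange (done.length : Int) (bl.length : Int) 1)
      = get_diff_bit_alt_go (bl.length : Int) bl.sum done.sum (done.length : Int) xs := by
  induction xs with
  | nil =>
    intro done h
    rw [PySem.List.pyRange_one_eq_nil (by simp [h])]
    rfl
  | cons b rest ih =>
    intro done h
    have hlen : (done.length : Int) < (bl.length : Int) := by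
      simp [h]
    rw [PySem.List.pyRange_one_cons hlen]
    have hto : ((done.length : Int) + 1) = ((done.length + 1 : Nat) : Int) := by push_cast; ring
    have htake : PySem.List.slice bl none (some ((done.length : Int) + 1)) = done ++ [b] := by
      rw [hto, PySem.List.slice_to_natCast, h, List.take_append]
      simp
    have hdrop : PySem.List.slice bl (some ((done.length : Int) + 1)) none = rest := by
      rw [hto, PySem.List.slice_from_natCast, h, List.drop_append]
      simp
    have hsum : bl.sum = done.sum + b + rest.sum := by simp [h]; ring
    show (if _ then _ else _) = _
    rw [get_diff_bit_alt_go]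
    rw [htake, hdrop]
    have e1 : ((done ++ [b]).sum = (done.length : Int) + 1 ∧ rest.sum = 0)
        ↔ (done.sum + b = (done.length : Int) + 1 ∧ bl.sum = done.sum + b) := by
      simp only [List.sum_append, List.sum_cons, List.sum_nil, add_zero, hsum]
      constructor <;> rintro ⟨h1, h2⟩ <;> exact ⟨h1, by omega⟩
    have e2 : ((done ++ [b]).sum = 0 ∧ rest.sum = (bl.length : Int) - 1 - (done.length : Int))
        ↔ (done.sum + b = 0 ∧ bl.sum = (bl.length : Int) - 1 - (done.length : Int)) := by
      simp only [List.sum_append, List.sum_cons, List.sum_nil, add_zero, hsum]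
      constructor <;> rintro ⟨h1, h2⟩ <;> exact ⟨h1, by omega⟩
    rw [if_congr e1 rfl rfl, if_congr (iff_of_eq (congrArg _ rfl)) rfl rfl]
    by_cases c1 : done.sum + b = (done.length : Int) + 1 ∧ bl.sum = done.sum + b
    · simp [c1]
    · rw [if_neg c1, if_neg c1]
      by_cases c2 : done.sum + b = 0 ∧ bl.sum = (bl.length : Int) - 1 - (done.length : Int)
      · rw [if_pos (e2.mpr c2), if_pos c2]
      · rw [if_neg (fun hh => c2 (e2.mp hh)), if_neg c2]
        have := ih (done ++ [b]) (by simp [h])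
        simpa using this

-- ===== VERDICT (by name: the statement is the Claim_ definition above) =====
theorem get_diff_bit_spec : Claim_equal_get_diff_bit := by
  intro bl _
  show get_diff_bit bl = get_diff_bit_alt bl
  have := get_diff_bit_key bl bl [] rfl
  simpa [get_diff_bit, get_diff_bit_alt] using this
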